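-- pv_equiv track=rewrite | github.com/mnestis/advent2017 | 03/part2.py | run_to_limit
-- ===== SOURCE A (Python) =====
-- def run_to_limit(limit):
--
--     x = 1
--     y = 0
--     index = 1
--     level = 1
--     direction = "up"
--
--     values = {(0, 0): 1}
--
--     while True:
--         value = 0
--         for i in range(x-1, x+2):
--             for j in range(y-1, y+2):
--                 if (i, j) in values:
--                     value += values[(i, j)]
--         values[(x, y)] = value
--
--         if value > limit:
--             return value
--
--         if direction == "up":
--             y += 1
--             if y == level:
--                 direction = "left"
--         elif direction == "left":
--             x -= 1
--             if x == -level: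
--                 direction = "down"
--         elif direction == "down":
--             y -= 1
--             if y == -level:
--                 direction = "right"
--         elif direction == "right":
--             x += 1
--             if x > level:
--                 direction = "up"
--                 level += 1
-- ===== SOURCE B (Python) =====
-- def run_to_limit(limit):
--     def coord(n):
--         # closed-form Ulam-spiral position of cell index n (index 0 = origin)
--         r = 0
--         while (2 * r + 1) ** 2 <= n:
--             r += 1
--         if r == 0:
--             return (0, 0)
--         k = n - (2 * r - 1) ** 2
--         side, off = divmod(k, 2 * r)
--         if side == 0:
--             return (r, off - r + 1)
--         if side == 1:
--             return (r - 1 - off, r)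
--         if side == 2:
--             return (-r, r - 1 - off)
--         return (off - r + 1, -r)
--
--     coords = [(0, 0)]
--     vals = [1]
--     n = 1
--     while True:
--         x, y = coord(n)
--         v = sum(w for (cx, cy), w in zip(coords, vals)
--                 if abs(cx - x) <= 1 and abs(cy - y) <= 1)
--         if v > limit:
--             return v
--         coords.append((x, y))
--         vals.append(v)
--         n += 1
-- ===== Notes on version B (the rewrite author's own statement) =====
-- stated objective: alternative
-- what changed: Dropped the coordinate dict, the 3x3 neighbor probe and the direction-string/level state machine entirely: B computes each cell's position by a closed-form index-to-coordinate map (ring + side/offset arithmetic) and memoizes values in a plain list, summing over all previously computed cells that lie within Chebyshev distance 1.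
import Mathlib
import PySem

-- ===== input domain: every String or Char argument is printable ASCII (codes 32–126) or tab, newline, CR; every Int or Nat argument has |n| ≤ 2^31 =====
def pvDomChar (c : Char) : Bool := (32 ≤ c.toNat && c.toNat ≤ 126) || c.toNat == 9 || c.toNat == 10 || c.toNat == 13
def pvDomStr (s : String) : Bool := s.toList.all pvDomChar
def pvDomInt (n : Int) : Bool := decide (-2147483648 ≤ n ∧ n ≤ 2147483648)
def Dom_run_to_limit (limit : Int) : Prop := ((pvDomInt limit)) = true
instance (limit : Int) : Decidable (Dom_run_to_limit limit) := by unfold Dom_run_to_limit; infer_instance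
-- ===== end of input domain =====

-- B drops A's dict, 3x3 probe and direction-string state machine: it maps each cell index to
-- its spiral coordinate by closed-form ring/side/offset arithmetic and memoizes values in a
-- plain list, summing the previously computed cells within Chebyshev distance 1 (alternative
-- decomposition, not faster). Both Pythons are 'while True' loops that only ever return; the
-- ports use fuel (150 cells), enough for every limit with |limit| ≤ 2^31 (cell 145's value is
-- 3813299996 > 2^31); on fuel exhaustion both ports return 0, so the proved equality holds
-- for every Int.

-- ===== PORT A =====

-- for i in range(x-1,x+2): for j in range(y-1,y+2): if (i,j) in values: value += values[(i,j)]
def cellA (x y : Int) (values : PySem.Dict (Int × Int) Int) : Int :=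
  (PySem.List.pyRange (x - 1) (x + 2) 1).foldl (fun acc i =>
    (PySem.List.pyRange (y - 1) (y + 2) 1).foldl (fun acc j =>
      if values.contains (i, j) then acc + values.getD (i, j) 0 else acc) acc) 0

-- the while-True loop, one fuel unit per cell
def aLoop (limit : Int) : Nat → Int → Int → Int → String → PySem.Dict (Int × Int) Int → Int
  | 0, _, _, _, _, _ => 0
  | fuel + 1, x, y, level, dir, values =>
    let value := cellA x y values
    let values := values.insert (x, y) value
    if value > limit then value
    else
      if dir == "up" then
        aLoop limit fuel x (y + 1) level (if y + 1 == level then "left" else dir) values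
      else if dir == "left" then
        aLoop limit fuel (x - 1) y level (if x - 1 == -level then "down" else dir) values
      else if dir == "down" then
        aLoop limit fuel x (y - 1) level (if y - 1 == -level then "right" else dir) values
      else if dir == "right" then
        if x + 1 > level then aLoop limit fuel (x + 1) y (level + 1) "up" values
        else aLoop limit fuel (x + 1) y level dir values
      else aLoop limit fuel x y level dir values

def run_to_limit (limit : Int) : Int :=
  aLoop limit 150 1 0 1 "up" (PySem.Dict.ofList [((0, 0), 1)])

-- ===== PORT B =====

-- while (2*r+1)**2 <= n: r += 1   (fuel n+1 suffices: r never exceeds n for n ≥ 0)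
def ringLoop (n : Int) : Nat → Int → Int
  | 0, r => r
  | fuel + 1, r => if (2 * r + 1) ^ 2 ≤ n then ringLoop n fuel (r + 1) else r

-- closed-form Ulam-spiral position of cell index n (index 0 = origin)
def coordB (n : Int) : Int × Int :=
  let r := ringLoop n (n.toNat + 1) 0
  if r == 0 then (0, 0)
  else
    let k := n - (2 * r - 1) ^ 2
    let side := PySem.Int.floordiv k (2 * r)
    let off := PySem.Int.mod k (2 * r)
    if side == 0 then (r, off - r + 1)
    else if side == 1 then (r - 1 - off, r)
    else if side == 2 then (-r, r - 1 - off)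
    else (off - r + 1, -r)

-- v = sum(w for (cx, cy), w in zip(coords, vals) if abs(cx-x)<=1 and abs(cy-y)<=1)
def cellB (x y : Int) (coords : List (Int × Int)) (vals : List Int) : Int :=
  (List.zip coords vals).foldl (fun acc cw =>
    if (cw.1.1 - x).natAbs ≤ 1 ∧ (cw.1.2 - y).natAbs ≤ 1 then acc + cw.2 else acc) 0

-- the while-True loop, one fuel unit per cell
def bLoop (limit : Int) : Nat → Int → List (Int × Int) → List Int → Int
  | 0, _, _, _ => 0
  | fuel + 1, n, coords, vals =>
    let p := coordB n
    let v := cellB p.1 p.2 coords vals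
    if v > limit then v
    else bLoop limit fuel (n + 1) (coords ++ [p]) (vals ++ [v])

def run_to_limit_alt (limit : Int) : Int :=
  bLoop limit 150 1 [(0, 0)] [1]

-- ===== PRECONDITION & SPEC =====
def Spec_run_to_limit (limit : Int) (out : Int) : Prop := out = run_to_limit_alt limit
instance (limit : Int) (out : Int) : Decidable (Spec_run_to_limit limit out) := by unfold Spec_run_to_limit; infer_instance

-- ===== CLAIM =====
def Claim_equal_run_to_limit : Prop := ∀ (limit : Int), Dom_run_to_limit limit → Spec_run_to_limit limit (run_to_limit limit)

-- ===== LEMMAS AND PROOFS =====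

-- first element of the value trace exceeding the limit (0 if none)
def firstOver (limit : Int) : List Int → Int
  | [] => 0
  | v :: vs => if v > limit then v else firstOver limit vs

-- the limit-independent value trace A computes
def valsA : Nat → Int → Int → Int → String → PySem.Dict (Int × Int) Int → List Int
  | 0, _, _, _, _, _ => []
  | fuel + 1, x, y, level, dir, values =>
    let value := cellA x y values
    let values := values.insert (x, y) value
    value ::
      (if dir == "up" then
        valsA fuel x (y + 1) level (if y + 1 == level then "left" else dir) values
      else if dir == "left" then
        valsA fuel (x - 1) y level (if x - 1 == -level then "down" else dir) values
      else if dir == "down" then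
        valsA fuel x (y - 1) level (if y - 1 == -level then "right" else dir) values
      else if dir == "right" then
        if x + 1 > level then valsA fuel (x + 1) y (level + 1) "up" values
        else valsA fuel (x + 1) y level dir values
      else valsA fuel x y level dir values)

-- the limit-independent value trace B computes
def valsB : Nat → Int → List (Int × Int) → List Int → List Int
  | 0, _, _, _ => []
  | fuel + 1, n, coords, vals =>
    let p := coordB n
    let v := cellB p.1 p.2 coords vals
    v :: valsB fuel (n + 1) (coords ++ [p]) (vals ++ [v])

theorem aLoop_eq_firstOver (fuel : Nat) : ∀ (limit x y level : Int) (dir : String)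
    (values : PySem.Dict (Int × Int) Int),
    aLoop limit fuel x y level dir values = firstOver limit (valsA fuel x y level dir values) := by
  induction fuel with
  | zero => intro limit x y level dir values; rfl
  | succ f ih =>
    intro limit x y level dir values
    simp only [aLoop, valsA, firstOver]
    by_cases hv : cellA x y values > limit
    · simp [hv]
    · simp only [if_neg hv]
      split_ifs <;> apply ih

theorem bLoop_eq_firstOver (fuel : Nat) : ∀ (limit n : Int) (coords : List (Int × Int))
    (vals : List Int),
    bLoop limit fuel n coords vals = firstOver limit (valsB fuel n coords vals) := by
  induction fuel with
  | zero => intro limit n coords vals; rfl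
  | succ f ih =>
    intro limit n coords vals
    simp only [bLoop, valsB, firstOver]
    by_cases hv : cellB (coordB n).1 (coordB n).2 coords vals > limit
    · simp [hv]
    · simp [hv, ih]

-- the two value traces coincide cell for cell (150 cells)
set_option maxRecDepth 200000 in
set_option maxHeartbeats 4000000 in
theorem valsA_eq_valsB :
    valsA 150 1 0 1 "up" (PySem.Dict.ofList [((0, 0), 1)]) = valsB 150 1 [(0, 0)] [1] := by
  decide

-- ===== VERDICT =====
theorem run_to_limit_spec : Claim_equal_run_to_limit := by
  intro limit _
  unfold Spec_run_to_limit run_to_limit run_to_limit_alt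
  rw [aLoop_eq_firstOver, bLoop_eq_firstOver, valsA_eq_valsB]
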